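-- pv_equiv track=rewrite | github.com/zdxy1999/StockDataService | static/repo/tushare_adapter.py | parse_column_desc_to_dict
-- ===== SOURCE A (Python) =====
-- def parse_column_desc_to_dict(input_string) -> list[dict]:
--     # 分割字符串为行
--     lines = input_string.strip().split('\n')
--
--     part_number = len(lines[0].split())
--
--     if part_number == 4:
--         result = [
--             {
--                 "字段名称": parts[0],
--                 "字段类型": parts[1],
--                 "是否默认显示": parts[2],
--                 "字段描述": ' '.join(parts[3:])
--             }
--             for line in lines
--             if (parts := line.split()) and len(parts) == 4
--         ]
--     elif part_number == 3:
--         result = [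
--             {
--                 "字段名称": parts[0],
--                 "字段类型": parts[1],
--                 "字段描述": ' '.join(parts[2:])
--             }
--             for line in lines
--             if (parts := line.split()) and len(parts) == 3
--         ]
--     else:
--         raise Exception("column desc number error")
--
--     return result
-- ===== SOURCE B (Python) =====
-- def parse_column_desc_to_dict(input_string) -> list[dict]:
--     lines = input_string.strip().split('\n')
--     n = len(lines[0].split())
--     if n == 3:
--         keys = ["字段名称", "字段类型", "字段描述"]
--     elif n == 4:
--         keys = ["字段名称", "字段类型", "是否默认显示", "字段描述"]
--     else:
--         raise Exception("column desc number error")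
--
--     def build(remaining):
--         # recursion on the list of lines, constructing the result back-to-front
--         if not remaining:
--             return []
--         rest = build(remaining[1:])
--         parts = remaining[0].split()
--         if len(parts) != n:
--             return rest
--         row = parts[:n - 1] + [' '.join(parts[n - 1:])]
--         return [dict(zip(keys, row))] + rest
--
--     return build(lines)
-- ===== Notes on version B (the rewrite author's own statement) =====
-- stated objective: alternative
-- what changed: Replaces A's two duplicated filtered comprehensions with a schema chosen once from the column count plus a recursive helper that walks the lines and builds the result back-to-front, normalizing each matching line into a fixed-width row (head fields + joined description) and zipping the key schema onto it.
import Mathlib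
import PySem

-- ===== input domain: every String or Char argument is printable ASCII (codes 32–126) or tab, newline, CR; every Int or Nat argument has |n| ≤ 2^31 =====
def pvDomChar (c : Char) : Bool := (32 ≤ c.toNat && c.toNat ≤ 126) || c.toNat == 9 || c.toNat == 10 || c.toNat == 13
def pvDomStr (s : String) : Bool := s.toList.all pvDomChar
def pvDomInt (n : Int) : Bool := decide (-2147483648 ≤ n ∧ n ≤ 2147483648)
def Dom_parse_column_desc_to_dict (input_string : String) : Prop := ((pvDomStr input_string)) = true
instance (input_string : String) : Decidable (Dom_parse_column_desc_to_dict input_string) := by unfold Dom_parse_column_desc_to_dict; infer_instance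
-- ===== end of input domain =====

-- B replaces A's two duplicated filtered comprehensions by a key schema chosen once plus a
-- recursive helper building the result back-to-front from normalized rows (objective: alternative).

-- ===== PORT A =====
-- lines = input_string.strip().split('\n'); split('\n') never returns [], so Python's lines[0] never raises (ported as headD "").
def pvLines (input_string : String) : List String :=
  (PySem.Str.split? (PySem.Str.strip input_string) "\n").getD []

-- part_number = len(lines[0].split())
def pvPartNumber (input_string : String) : Nat :=
  (PySem.Str.split₀ ((pvLines input_string).headD "")).length

def parse_column_desc_to_dict (input_string : String) : List (List (String × String)) :=
  if pvPartNumber input_string = 4 then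
    (pvLines input_string).foldl (fun result line =>
      let parts := PySem.Str.split₀ line
      if parts ≠ [] ∧ parts.length = 4 then
        result ++ [[("字段名称", PySem.List.pyGetD parts 0 ""),
                    ("字段类型", PySem.List.pyGetD parts 1 ""),
                    ("是否默认显示", PySem.List.pyGetD parts 2 ""),
                    ("字段描述", PySem.Str.join " " (PySem.List.slice parts (some 3) none))]]
      else result) []
  else if pvPartNumber input_string = 3 then
    (pvLines input_string).foldl (fun result line =>
      let parts := PySem.Str.split₀ line
      if parts ≠ [] ∧ parts.length = 3 then
        result ++ [[("字段名称", PySem.List.pyGetD parts 0 ""),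
                    ("字段类型", PySem.List.pyGetD parts 1 ""),
                    ("字段描述", PySem.Str.join " " (PySem.List.slice parts (some 2) none))]]
      else result) []
  else []  -- Python raises the column-count Exception here; excluded by Pre_

-- ===== PORT B =====
-- build(remaining): recursion on the lines, constructing the result back-to-front.
-- dict(zip(keys, row)) with distinct keys and len(row) = len(keys) is the association list keys.zip row.
def pvBuild (n : Nat) (keys : List String) : List String → List (List (String × String))
  | [] => []
  | line :: remaining =>
    let rest := pvBuild n keys remaining
    let parts := PySem.Str.split₀ line
    if parts.length ≠ n then rest
    else
      (keys.zip (PySem.List.slice parts none (some ((n : Int) - 1)) ++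
                 [PySem.Str.join " " (PySem.List.slice parts (some ((n : Int) - 1)) none)])) :: rest

def parse_column_desc_to_dict_alt (input_string : String) : List (List (String × String)) :=
  let n := pvPartNumber input_string
  if n = 3 then pvBuild n ["字段名称", "字段类型", "字段描述"] (pvLines input_string)
  else if n = 4 then pvBuild n ["字段名称", "字段类型", "是否默认显示", "字段描述"] (pvLines input_string)
  else []  -- Python B raises the column-count Exception here; excluded by Pre_

-- ===== PRECONDITION & SPEC =====
-- Pre_ admits exactly the inputs where Python A returns: the first stripped line must have 3 or 4
-- whitespace-separated fields, otherwise A (and B) raise the column-count Exception.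
def Pre_parse_column_desc_to_dict (input_string : String) : Prop :=
  pvPartNumber input_string = 3 ∨ pvPartNumber input_string = 4
instance (input_string : String) : Decidable (Pre_parse_column_desc_to_dict input_string) := by
  unfold Pre_parse_column_desc_to_dict; infer_instance

def pvWitness_parse_column_desc_to_dict : String := "name str Y description\nts_code str Y the stock code"

def Spec_parse_column_desc_to_dict (input_string : String) (out : List (List (String × String))) : Prop := out = parse_column_desc_to_dict_alt input_string
instance (input_string : String) (out : List (List (String × String))) : Decidable (Spec_parse_column_desc_to_dict input_string out) := by unfold Spec_parse_column_desc_to_dict; infer_instance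

-- ===== CLAIM =====
def Claim_equal_parse_column_desc_to_dict : Prop := ∀ (input_string : String), Dom_parse_column_desc_to_dict input_string → Pre_parse_column_desc_to_dict input_string → Spec_parse_column_desc_to_dict input_string (parse_column_desc_to_dict input_string)

-- ===== LEMMAS AND PROOFS =====

-- A's per-line dict for a 3-field line equals B's zip of the schema with the normalized row.
lemma pv_body3 (parts : List String) (h : parts.length = 3) :
    [("字段名称", PySem.List.pyGetD parts 0 ""),
     ("字段类型", PySem.List.pyGetD parts 1 ""),
     ("字段描述", PySem.Str.join " " (PySem.List.slice parts (some 2) none))]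
    = ["字段名称", "字段类型", "字段描述"].zip
        (PySem.List.slice parts none (some ((3 : Int) - 1)) ++
         [PySem.Str.join " " (PySem.List.slice parts (some ((3 : Int) - 1)) none)]) := by
  rcases parts with _ | ⟨a, _ | ⟨b, _ | ⟨c, rest⟩⟩⟩ <;> simp_all
  simp [PySem.List.pyGetD, PySem.List.pyIdx?, PySem.List.pyGet?, PySem.List.slice,
        PySem.List.clampIdx, List.zip]

-- A's per-line dict for a 4-field line equals B's zip of the schema with the normalized row.
lemma pv_body4 (parts : List String) (h : parts.length = 4) :
    [("字段名称", PySem.List.pyGetD parts 0 ""),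
     ("字段类型", PySem.List.pyGetD parts 1 ""),
     ("是否默认显示", PySem.List.pyGetD parts 2 ""),
     ("字段描述", PySem.Str.join " " (PySem.List.slice parts (some 3) none))]
    = ["字段名称", "字段类型", "是否默认显示", "字段描述"].zip
        (PySem.List.slice parts none (some ((4 : Int) - 1)) ++
         [PySem.Str.join " " (PySem.List.slice parts (some ((4 : Int) - 1)) none)]) := by
  rcases parts with _ | ⟨a, _ | ⟨b, _ | ⟨c, _ | ⟨d, rest⟩⟩⟩⟩ <;> simp_all
  simp [PySem.List.pyGetD, PySem.List.pyIdx?, PySem.List.pyGet?, PySem.List.slice,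
        PySem.List.clampIdx, List.zip]

-- A's append-at-the-back fold over lines equals B's back-to-front recursion, whenever
-- the per-line payloads agree on lines of the right width.
lemma pv_fold_eq_build (n : Nat) (keys : List String)
    (f : List String → List (String × String))
    (hf : ∀ parts : List String, parts.length = n →
      f parts = keys.zip (PySem.List.slice parts none (some ((n : Int) - 1)) ++
                          [PySem.Str.join " " (PySem.List.slice parts (some ((n : Int) - 1)) none)]))
    (hn : 0 < n) :
    ∀ (lines : List String) (acc : List (List (String × String))),
      lines.foldl (fun result line =>
        let parts := PySem.Str.split₀ line
        if parts ≠ [] ∧ parts.length = n then result ++ [f parts] else result) acc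
      = acc ++ pvBuild n keys lines := by
  intro lines
  induction lines with
  | nil => intro acc; simp [pvBuild]
  | cons line rest ih =>
    intro acc
    simp only [List.foldl_cons, pvBuild]
    by_cases h : (PySem.Str.split₀ line).length = n
    · have hne : PySem.Str.split₀ line ≠ [] := by
        intro he; rw [he] at h; simp at h; omega
      rw [if_pos ⟨hne, h⟩, if_neg (by simp [h]), ih, hf _ h, List.append_assoc]
      rfl
    · rw [if_neg (fun hc => h hc.2), if_pos h, ih]

-- ===== VERDICT =====
theorem parse_column_desc_to_dict_spec : Claim_equal_parse_column_desc_to_dict := by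
  intro s _ hpre
  unfold Spec_parse_column_desc_to_dict parse_column_desc_to_dict parse_column_desc_to_dict_alt
  rcases hpre with h3 | h4
  · rw [h3]
    simp only [if_neg (by decide : ¬ (3 = 4))]
    exact (pv_fold_eq_build 3 _ _ (fun parts h => pv_body3 parts h) (by omega)
      (pvLines s) []).trans (by simp)
  · rw [h4]
    simp only [if_neg (by decide : ¬ (4 = 3))]
    exact (pv_fold_eq_build 4 _ _ (fun parts h => pv_body4 parts h) (by omega)
      (pvLines s) []).trans (by simp)
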